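-- pv_equiv track=rewrite | github.com/filemon11/discoparset-supertag | src/CCG_helper.py | get_sketch
-- ===== SOURCE A (Python) =====
-- def get_sketch(supertag : str) -> str:
--     '''Converts supertag into sketch with
--     all elements replaced by "X"
--
--     Multi-character symbols are treated
--     the same as one-character symbols.
--
--     :param supertag: supertag
--     :type supertag: str
--     :return: sketch
--     :rtype: str
--     '''
--
--     sketch      : str = ""
--     in_symbol   : bool = False
--
--     for c in supertag:
--
--         if c not in ("\\", "/", "(", ")"):
--             if in_symbol:
--                 continue
--
--             sketch += "X"
--             in_symbol = True
--
--         else: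
--             sketch += c
--             in_symbol = False
--
--     return sketch
-- ===== SOURCE B (Python) =====
-- def get_sketch(supertag : str) -> str:
--     # Two staged passes: (1) map every non-separator character to "X";
--     # (2) drop each "X" whose left neighbour is also "X" (pairwise zip).
--     xed = "".join(c if c in "\\/()" else "X" for c in supertag)
--     return xed[:1] + "".join(c for prev, c in zip(xed, xed[1:])
--                              if not (prev == "X" and c == "X"))
-- ===== Notes on version B (the rewrite author's own statement) =====
-- stated objective: alternative
-- what changed: Replaces the single-pass in_symbol state machine with two staged passes: first map every non-separator character to 'X', then delete each 'X' whose left neighbour (via zip of the string with its own tail) is also 'X'.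
import Mathlib
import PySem

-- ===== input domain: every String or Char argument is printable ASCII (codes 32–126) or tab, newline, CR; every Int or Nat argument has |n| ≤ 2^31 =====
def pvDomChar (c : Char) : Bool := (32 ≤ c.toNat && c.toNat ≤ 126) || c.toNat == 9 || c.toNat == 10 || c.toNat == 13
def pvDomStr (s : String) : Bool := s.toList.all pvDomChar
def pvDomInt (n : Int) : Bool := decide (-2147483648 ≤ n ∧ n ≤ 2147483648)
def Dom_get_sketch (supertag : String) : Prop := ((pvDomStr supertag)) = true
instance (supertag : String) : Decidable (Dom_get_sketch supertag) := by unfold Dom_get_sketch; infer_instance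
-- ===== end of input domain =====

-- B restates A's one-pass state machine as two staged passes (map to 'X', then
-- pairwise deduplication of adjacent 'X's); same return value on every input.


-- ===== PORT A =====
-- loop body of A: one step of the scan carrying the state (sketch, in_symbol)
def gsStepA (st : List Char × Bool) (c : Char) : List Char × Bool :=
  if !(c == '\\' || c == '/' || c == '(' || c == ')') then
    if st.2 then st
    else (st.1 ++ ['X'], true)
  else (st.1 ++ [c], false)

def get_sketch (supertag : String) : String :=
  (List.foldl gsStepA ([], false) supertag.toList).1.asString

-- ===== PORT B =====
-- c in "\\/()"
def gsIsSep (c : Char) : Bool := c == '\\' || c == '/' || c == '(' || c == ')'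

-- pass 1: map every non-separator char to 'X'
def gsXed (cs : List Char) : List Char :=
  cs.map (fun c => if gsIsSep c then c else 'X')

-- pass 2: xed[:1] + chars c of zip(xed, xed[1:]) with not (prev == 'X' and c == 'X')
def get_sketch_alt (supertag : String) : String :=
  let xed := gsXed supertag.toList
  (xed.take 1 ++ ((xed.zip (xed.drop 1)).filterMap
      (fun pc => if pc.1 == 'X' && pc.2 == 'X' then none else some pc.2))).asString

-- ===== PRECONDITION & SPEC =====
def Spec_get_sketch (supertag : String) (out : String) : Prop := out = get_sketch_alt supertag
instance (supertag : String) (out : String) : Decidable (Spec_get_sketch supertag out) := by unfold Spec_get_sketch; infer_instance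

-- ===== CLAIM (what is proved, stated in full; the proofs are below) =====
def Claim_equal_get_sketch : Prop := ∀ (supertag : String), Dom_get_sketch supertag → Spec_get_sketch supertag (get_sketch supertag)

-- ===== LEMMAS AND PROOFS =====

-- canonical recursive characterisation of the sketch
def gsSk : List Char → Bool → List Char
  | [], _ => []
  | c :: cs, inSym =>
    if gsIsSep c then c :: gsSk cs false
    else if inSym then gsSk cs inSym
    else 'X' :: gsSk cs true

-- A's fold computes gsSk
theorem foldA_eq (cs : List Char) (acc : List Char) (b : Bool) :
    (List.foldl gsStepA (acc, b) cs).1 = acc ++ gsSk cs b := by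
  induction cs generalizing acc b with
  | nil => simp [gsSk]
  | cons c cs ih =>
    rw [List.foldl_cons]
    cases hs : gsIsSep c with
    | true =>
      have h1 : gsStepA (acc, b) c = (acc ++ [c], false) := by
        simp only [gsStepA]
        have hs' : (c == '\\' || c == '/' || c == '(' || c == ')') = true := by
          simpa [gsIsSep] using hs
        simp [hs']
      rw [h1, ih]
      simp [gsSk, hs]
    | false =>
      have hs' : (c == '\\' || c == '/' || c == '(' || c == ')') = false := by
        simpa [gsIsSep] using hs
      cases b with
      | false =>
        have h1 : gsStepA (acc, false) c = (acc ++ ['X'], true) := by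
          simp [gsStepA, hs']
        rw [h1, ih]
        simp [gsSk, hs]
      | true =>
        have h1 : gsStepA (acc, true) c = (acc, true) := by
          simp [gsStepA, hs']
        rw [h1, ih]
        simp [gsSk, hs]

-- proof-side recursive form of B's pass 2 acting on the tail, given the previous char
def gsCol (prev : Char) : List Char → List Char
  | [] => []
  | c :: cs => (if prev == 'X' && c == 'X' then [] else [c]) ++ gsCol c cs

-- the zip-filterMap of pass 2 computes gsCol
theorem zip_eq_gsCol (rest : List Char) (prev : Char) :
    ((prev :: rest).zip rest).filterMap
        (fun pc => if pc.1 == 'X' && pc.2 == 'X' then none else some pc.2)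
      = gsCol prev rest := by
  induction rest generalizing prev with
  | nil => simp [gsCol]
  | cons c t ih =>
    simp only [List.zip_cons_cons, List.filterMap_cons, gsCol]
    rw [← ih c]
    by_cases h : (prev == 'X' && c == 'X') = true <;> simp [h]

-- a separator character is never 'X'
theorem sep_ne_X (c : Char) (hs : gsIsSep c = true) : (c == 'X') = false := by
  simp only [gsIsSep] at hs
  rcases Bool.or_eq_true_iff.mp hs with h | h
  · rcases Bool.or_eq_true_iff.mp h with h | h
    · rcases Bool.or_eq_true_iff.mp h with h | h <;>
        simp [beq_iff_eq] at h <;> subst h <;> decide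
    · simp [beq_iff_eq] at h; subst h; decide
  · simp [beq_iff_eq] at h; subst h; decide

-- collapsing the mapped tail computes gsSk with in_symbol = (prev mapped to 'X')
theorem gsCol_xed (cs : List Char) (prev : Char) :
    gsCol prev (gsXed cs) = gsSk cs (prev == 'X') := by
  induction cs generalizing prev with
  | nil => simp [gsXed, gsCol, gsSk]
  | cons c t ih =>
    cases hs : gsIsSep c with
    | true =>
      have hX := sep_ne_X c hs
      simp only [gsXed, List.map_cons, hs, gsCol, gsSk] at *
      simp [hX, ih c]
    | false =>
      simp only [gsXed, List.map_cons, hs, gsCol, gsSk] at *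
      have ihX := ih 'X'
      
      cases hp : (prev == 'X') with
      | true => simp [ihX]
      | false => simp [ihX]

-- ===== VERDICT (by name: the statement is the Claim_ definition above) =====
theorem get_sketch_spec : Claim_equal_get_sketch := by
  intro supertag _
  show get_sketch supertag = get_sketch_alt supertag
  unfold get_sketch get_sketch_alt
  rw [foldA_eq]
  cases hcs : supertag.toList with
  | nil => simp [gsXed, gsSk]
  | cons c t =>
    have hx : gsXed (c :: t) = (if gsIsSep c then c else 'X') :: gsXed t := by
      simp [gsXed]
    simp only [hx, List.take_succ_cons, List.take_zero, List.drop_succ_cons,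
      List.drop_zero]
    rw [zip_eq_gsCol, gsCol_xed]
    cases hs : gsIsSep c with
    | true =>
      have hX := sep_ne_X c hs
      simp [gsSk, hs, hX]
    | false =>
      simp [gsSk, hs]
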